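-- pv_equiv track=rewrite | github.com/paramite/logstat | src/logstat/logstat.py | guess_severity
-- ===== SOURCE A (Python) =====
-- def guess_severity(pri):
--     """Tries to figure out severity from priority"""
--     # pri = fac * 8 + sev; so: pri - x<0-7> % 8 -> 0 == x is severity
--     pri = int(pri)
--     if pri == 0:
--         return pri
--     for i in range(0, 8):
--         if not ((int(pri) - i) % 8):
--             return i
--     else:
--         return int(pri)
-- ===== SOURCE B (Python) =====
-- def guess_severity(pri):
--     """Tries to figure out severity from priority"""
--     return int(pri) % 8
-- ===== Notes on version B (the rewrite author's own statement) =====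
-- stated objective: simpler
-- what changed: Replaces the fixed-length residue search and the zero-priority special case with the closed-form modulo expression.
import Mathlib
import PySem

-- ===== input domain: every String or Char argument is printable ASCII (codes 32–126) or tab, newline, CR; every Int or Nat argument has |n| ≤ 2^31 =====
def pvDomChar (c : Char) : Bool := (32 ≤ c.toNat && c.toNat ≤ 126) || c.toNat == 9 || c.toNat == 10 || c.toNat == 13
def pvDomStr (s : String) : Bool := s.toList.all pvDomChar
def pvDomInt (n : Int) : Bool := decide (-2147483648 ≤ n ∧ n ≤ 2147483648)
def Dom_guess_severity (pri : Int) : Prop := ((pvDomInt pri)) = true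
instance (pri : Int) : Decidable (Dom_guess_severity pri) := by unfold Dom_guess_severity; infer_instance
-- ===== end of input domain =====

-- B replaces A's fixed-length residue search (and the zero-priority special case) with the closed-form modulo; objective: simpler.

-- ===== PORT A =====
-- A's for-loop over range(0, 8): return the first i with (pri - i) % 8 == 0, else (loop exhausted) return pri
def gsLoopA (pri : Int) : List Int → Int
  | [] => pri
  | i :: rest => if PySem.Int.mod (pri - i) 8 == 0 then i else gsLoopA pri rest

def guess_severity (pri : Int) : Int :=
  -- pri = int(pri) is the identity on an Int argument
  if pri == 0 then pri
  else gsLoopA pri (PySem.List.pyRange 0 8 1)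

-- ===== PORT B =====
def guess_severity_alt (pri : Int) : Int := PySem.Int.mod pri 8

-- ===== PRECONDITION & SPEC =====
def Spec_guess_severity (pri : Int) (out : Int) : Prop := out = guess_severity_alt pri
instance (pri : Int) (out : Int) : Decidable (Spec_guess_severity pri out) := by unfold Spec_guess_severity; infer_instance

-- ===== CLAIM (what is proved, stated in full; the proofs are below) =====
def Claim_equal_guess_severity : Prop := ∀ (pri : Int), Dom_guess_severity pri → Spec_guess_severity pri (guess_severity pri)

-- ===== LEMMAS AND PROOFS =====
theorem pvRange8 : PySem.List.pyRange 0 8 1 = [0, 1, 2, 3, 4, 5, 6, 7] := by decide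

theorem pvModEmod (a : Int) : PySem.Int.mod a 8 = a % 8 :=
  PySem.Int.mod_eq_emod_of_pos (by norm_num)

theorem pvLoopA (pri : Int) : gsLoopA pri [0, 1, 2, 3, 4, 5, 6, 7] = pri % 8 := by
  simp only [gsLoopA, pvModEmod, beq_iff_eq]
  split_ifs <;> omega

-- ===== VERDICT (by name: the statement is the Claim_ definition above) =====
theorem guess_severity_spec : Claim_equal_guess_severity := by
  intro pri _
  unfold Spec_guess_severity guess_severity guess_severity_alt
  rw [pvRange8, pvModEmod]
  by_cases h : pri = 0
  · simp [h]
  · simp [h, pvLoopA]
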